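-- pv_equiv track=rewrite | github.com/doubc/The_Theory_of_Difference | scripts/实现改版clem_morse_原始大文件.py | find_long_cycles
-- ===== SOURCE A (Python) =====
-- def find_long_cycles(directed_edges, vertices, min_length):
--     """
--     找出所有长度 >= min_length 的有向循环，
--     返回参与这些循环的顶点集合和边集合。
--
--     用 DFS 找有向图中的所有简单环。
--     对大图（N=6，20顶点）可能很慢，需要剪枝。
--     """
--     from collections import defaultdict
--
--     adj = defaultdict(list)
--     for src, tgt in directed_edges:
--         adj[src].append(tgt)
--
--     participating_vertices = set()
--     participating_edges = set()
--
--     def dfs(start, current, path, path_set):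
--         for nxt in adj[current]:
--             if nxt == start and len(path) >= min_length:
--                 # 找到一个有效循环
--                 for v in path:
--                     participating_vertices.add(v)
--                 for i in range(len(path)):
--                     participating_edges.add(
--                         (path[i], path[(i + 1) % len(path)]))
--                 return
--             if nxt not in path_set and len(path) < min_length * 2:
--                 path.append(nxt)
--                 path_set.add(nxt)
--                 dfs(start, nxt, path, path_set)
--                 path.pop()
--                 path_set.remove(nxt)
--
--     for v in vertices:
--         dfs(v, v, [v], {v})
--
--     return participating_vertices, participating_edges
-- ===== SOURCE B (Python) =====
-- def find_long_cycles(directed_edges, vertices, min_length):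
--     """Iterative explicit-stack DFS (no recursion): frames carry (node, neighbor
--     iterator, remaining depth budget); cycles of length >= min_length are
--     collected exactly as in the recursive version."""
--     adj = {}
--     for src, tgt in directed_edges:
--         adj.setdefault(src, []).append(tgt)
--
--     participating_vertices = set()
--     participating_edges = set()
--
--     for start in vertices:
--         path = [start]
--         path_set = {start}
--         stack = [(start, iter(adj.get(start, ())), 2 * min_length - 1)]
--         while stack:
--             node, it, budget = stack[-1]
--             nxt = next(it, None)
--             if nxt is None:
--                 # this frame is exhausted: undo its path entry
--                 stack.pop()
--                 path.pop()
--                 path_set.discard(node)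
--             elif nxt == start and len(path) >= min_length:
--                 # found a valid cycle: record it, then abandon this frame
--                 participating_vertices.update(path)
--                 n = len(path)
--                 for i in range(n):
--                     participating_edges.add((path[i], path[(i + 1) % n]))
--                 stack.pop()
--                 path.pop()
--                 path_set.discard(node)
--             elif nxt not in path_set and budget > 0:
--                 stack.append((nxt, iter(adj.get(nxt, ())), budget - 1))
--                 path.append(nxt)
--                 path_set.add(nxt)
--     return participating_vertices, participating_edges
-- ===== Notes on version B (the rewrite author's own statement) =====
-- stated objective: alternative
-- what changed: The recursive DFS helper is replaced by an iterative explicit-stack DFS: each stack frame holds (node, neighbor iterator, remaining depth budget), cycle detection pops exactly the current frame, and frame pops undo the shared path/path_set entries.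
import Mathlib
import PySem

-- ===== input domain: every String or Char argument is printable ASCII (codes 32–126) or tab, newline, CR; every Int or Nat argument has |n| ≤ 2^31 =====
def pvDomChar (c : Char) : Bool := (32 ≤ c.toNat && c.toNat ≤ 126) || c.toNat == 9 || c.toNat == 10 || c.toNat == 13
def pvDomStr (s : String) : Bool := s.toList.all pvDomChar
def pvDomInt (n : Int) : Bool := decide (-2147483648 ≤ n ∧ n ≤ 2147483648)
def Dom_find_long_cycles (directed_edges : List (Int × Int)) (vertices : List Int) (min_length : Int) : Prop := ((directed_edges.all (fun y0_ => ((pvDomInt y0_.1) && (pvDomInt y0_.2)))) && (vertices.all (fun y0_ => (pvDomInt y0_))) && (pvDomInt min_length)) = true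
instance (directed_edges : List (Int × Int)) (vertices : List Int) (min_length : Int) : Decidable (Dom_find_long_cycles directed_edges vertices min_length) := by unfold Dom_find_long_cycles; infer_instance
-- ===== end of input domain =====

-- B rewrites A's recursive DFS as an explicit-stack iterative DFS (frames carry the node, the
-- remaining neighbours and a depth budget); same return value, no recursion (objective: alternative).

-- ===== PORT A =====
-- adjacency dict: A's `adj = defaultdict(list); adj[src].append(tgt)` (B's setdefault+append builds
-- the identical dict, so the helper is shared by both ports)
def pvAdj (directed_edges : List (Int × Int)) : PySem.Dict Int (List Int) :=
  directed_edges.foldl (fun d e => d.insert e.1 (d.getD e.1 [] ++ [e.2])) PySem.Dict.empty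

-- the cycle-recording block (`for v in path: …; for i in range(len(path)): …`), identical in A and B
def pvAddCycle (path : List Int) (st : PySem.Set Int × PySem.Set (Int × Int)) :
    PySem.Set Int × PySem.Set (Int × Int) :=
  (path.foldl (fun s v => PySem.Set.add s v) st.1,
   (PySem.List.pyRange 0 (path.length : Int) 1).foldl
     (fun s i => PySem.Set.add s
       ((PySem.List.pyGet? path i).getD 0,
        (PySem.List.pyGet? path (PySem.Int.mod (i + 1) (path.length : Int))).getD 0)) st.2)

-- A's recursive `dfs` (its inner `for nxt in adj[current]` loop, recursing on the neighbour list);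
-- `fuel` is only a totality guard for the recursion depth: it is chosen large enough at the call
-- site ((2*min_length).toNat + 1) that the fuel-0 branch is never reached (the push guard demands
-- len(path) < min_length*2 and each push lengthens the path by one)
def pvGoA (adj : PySem.Dict Int (List Int)) (ml start : Int) :
    Nat → List Int → PySem.Set Int → List Int →
    PySem.Set Int × PySem.Set (Int × Int) → PySem.Set Int × PySem.Set (Int × Int)
  | _, _, _, [], st => st
  | fuel, path, pset, n :: ns, st =>
    if n = start ∧ ml ≤ (path.length : Int) then pvAddCycle path st
    else if n ∉ pset ∧ (path.length : Int) < ml * 2 then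
      match fuel with
      | 0 => pvGoA adj ml start 0 path pset ns st
      | f + 1 =>
        pvGoA adj ml start (f + 1) path pset ns
          (pvGoA adj ml start f (path ++ [n]) (PySem.Set.add pset n) (adj.getD n []) st)
    else pvGoA adj ml start fuel path pset ns st
  termination_by fuel _ __ ns _ => (fuel, ns.length)

def find_long_cycles (directed_edges : List (Int × Int)) (vertices : List Int) (min_length : Int) : List Int × (List (Int × Int)) :=
  let adj := pvAdj directed_edges
  vertices.foldl
    (fun st v =>
      pvGoA adj min_length v ((min_length * 2).toNat + 1) [v] (PySem.Set.ofList [v])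
        (adj.getD v []) st)
    (PySem.Set.empty, PySem.Set.empty)

-- ===== PORT B =====
-- bound used by B's termination measure: every adjacency list is shorter than the edge count
theorem pvAdj_getD_len (directed_edges : List (Int × Int)) :
    ∀ v : Int, ((pvAdj directed_edges).getD v []).length + 3 ≤ directed_edges.length + 3 := by
  have aux : ∀ (es : List (Int × Int)) (d : PySem.Dict Int (List Int)) (v : Int),
      ((es.foldl (fun d e => d.insert e.1 (d.getD e.1 [] ++ [e.2])) d).getD v []).length
        ≤ (d.getD v []).length + es.length := by
    intro es
    induction es with
    | nil => intro d v; simp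
    | cons e es ih =>
      intro d v
      refine le_trans (ih _ v) ?_
      simp only [PySem.Dict.getD_insert, List.length_cons]
      split
      · next h => subst h; simp; omega
      · omega
  intro v
  have := aux directed_edges PySem.Dict.empty v
  simp only [PySem.Dict.getD_empty] at this
  simpa using Nat.add_le_add_right (by simpa using this) 3

-- weight of B's stack, used only as the termination measure of pvRunB
def pvStackW (C : Nat) : List (Int × List Int × Int) → Nat
  | [] => 0
  | (_, ns, b) :: stk => (ns.length + 2) * C ^ b.toNat + pvStackW C stk

-- B's `while stack:` loop. A frame is (node, remaining neighbours, budget); the iterator becomes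
-- the remaining-neighbour list, `next(it, None)` is the pattern match on it. The parameters C/hC
-- only feed the termination measure (they are not part of the computation).
def pvRunB (adj : PySem.Dict Int (List Int)) (C : Nat)
    (hC : ∀ v : Int, (adj.getD v []).length + 3 ≤ C) (ml start : Int) :
    List (Int × List Int × Int) → List Int → PySem.Set Int →
    PySem.Set Int × PySem.Set (Int × Int) → PySem.Set Int × PySem.Set (Int × Int)
  | [], _, _, st => st
  | (node, [], b) :: stk, path, pset, st =>
    -- frame exhausted (`nxt is None`): pop it, undo its path entry
    pvRunB adj C hC ml start stk path.dropLast (PySem.Set.discard pset node) st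
  | (node, n :: ns, b) :: stk, path, pset, st =>
    if n = start ∧ ml ≤ (path.length : Int) then
      -- cycle found: record it, abandon this frame
      pvRunB adj C hC ml start stk path.dropLast (PySem.Set.discard pset node)
        (pvAddCycle path st)
    else if h2 : n ∉ pset ∧ 0 < b then
      -- push a frame for n
      pvRunB adj C hC ml start ((n, adj.getD n [], b - 1) :: (node, ns, b) :: stk)
        (path ++ [n]) (PySem.Set.add pset n) st
    else
      pvRunB adj C hC ml start ((node, ns, b) :: stk) path pset st
  termination_by stk _ _ _ => pvStackW C stk
  decreasing_by
  · simp only [pvStackW, List.length_nil]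
    have h1 : 1 ≤ C ^ b.toNat := Nat.one_le_pow _ _ (by have := hC 0; omega)
    omega
  · simp only [pvStackW, List.length_cons]
    exact Nat.lt_add_of_pos_left
      (Nat.mul_pos (by omega) (Nat.pow_pos (by have := hC 0; omega)))
  · simp only [pvStackW, List.length_cons]
    have hb : b.toNat = (b - 1).toNat + 1 := by omega
    have hx : 1 ≤ C ^ (b - 1).toNat := Nat.one_le_pow _ _ (by have := hC 0; omega)
    have key : ((adj.getD n []).length + 2) * C ^ (b - 1).toNat < C ^ b.toNat := by
      rw [hb, pow_succ, mul_comm (C ^ (b - 1).toNat) C]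
      exact Nat.mul_lt_mul_of_lt_of_le (by have := hC n; omega) le_rfl (by omega)
    have hexp : (ns.length + 1 + 2) * C ^ b.toNat
        = (ns.length + 2) * C ^ b.toNat + C ^ b.toNat := by ring
    rw [hexp]; linarith [key]
  · have h1 : 1 ≤ C ^ b.toNat := Nat.one_le_pow _ _ (by have := hC 0; omega)
    simp only [pvStackW, List.length_cons]
    have hexp : (ns.length + 1 + 2) * C ^ b.toNat
        = (ns.length + 2) * C ^ b.toNat + C ^ b.toNat := by ring
    rw [hexp]; linarith [h1]

def find_long_cycles_alt (directed_edges : List (Int × Int)) (vertices : List Int) (min_length : Int) : List Int × (List (Int × Int)) :=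
  let adj := pvAdj directed_edges
  vertices.foldl
    (fun st start =>
      pvRunB adj (directed_edges.length + 3) (pvAdj_getD_len directed_edges) min_length start
        [(start, adj.getD start [], 2 * min_length - 1)] [start] (PySem.Set.ofList [start]) st)
    (PySem.Set.empty, PySem.Set.empty)

-- ===== PRECONDITION & SPEC =====
def Spec_find_long_cycles (directed_edges : List (Int × Int)) (vertices : List Int) (min_length : Int) (out : List Int × (List (Int × Int))) : Prop := out = find_long_cycles_alt directed_edges vertices min_length
instance (directed_edges : List (Int × Int)) (vertices : List Int) (min_length : Int) (out : List Int × (List (Int × Int))) : Decidable (Spec_find_long_cycles directed_edges vertices min_length out) := by unfold Spec_find_long_cycles; infer_instance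

-- ===== CLAIM (what is proved, stated in full; the proofs are below) =====
def Claim_equal_find_long_cycles : Prop := ∀ (directed_edges : List (Int × Int)) (vertices : List Int) (min_length : Int), Dom_find_long_cycles directed_edges vertices min_length → Spec_find_long_cycles directed_edges vertices min_length (find_long_cycles directed_edges vertices min_length)

-- ===== LEMMAS AND PROOFS =====

-- undoing a push restores the path set
theorem pv_discard_add {s : PySem.Set Int} {n : Int} (h : n ∉ s) :
    PySem.Set.discard (PySem.Set.add s n) n = s := by
  simp only [PySem.Set.discard, PySem.Set.add_of_not_mem h, List.filter_append, BEq.rfl,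
    Bool.not_true, Bool.false_eq_true, not_false_eq_true, List.filter_cons_of_neg,
    List.filter_nil, List.append_nil, List.filter_eq_self, Bool.not_eq_eq_eq_not,
    beq_eq_false_iff_ne, ne_eq]
  exact fun a ha han => h (han ▸ ha)

-- MAIN SIMULATION LEMMA: running B's machine on a top frame (node, ns, b) whose budget agrees with
-- the path length (b = ml*2 - len(path)) and with enough A-side fuel behaves like running A's dfs
-- loop on ns and then popping the frame.
theorem pvRunB_eq_pvGoA (adj : PySem.Dict Int (List Int)) (C : Nat)
    (hC : ∀ v : Int, (adj.getD v []).length + 3 ≤ C) (ml start : Int) :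
    ∀ (fuel : Nat) (ns : List Int) (node b : Int) (path : List Int) (pset : PySem.Set Int)
      (stk : List (Int × List Int × Int)) (st : PySem.Set Int × PySem.Set (Int × Int)),
      b = ml * 2 - (path.length : Int) →
      ml * 2 + 1 ≤ (path.length : Int) + (fuel : Int) →
      pvRunB adj C hC ml start ((node, ns, b) :: stk) path pset st
        = pvRunB adj C hC ml start stk path.dropLast (PySem.Set.discard pset node)
            (pvGoA adj ml start fuel path pset ns st) := by
  intro fuel
  induction fuel with
  | zero =>
    intro ns node b path pset stk st hb hf
    induction ns generalizing st with
    | nil => rw [pvRunB, pvGoA]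
    | cons n ns ih =>
      rw [pvRunB, pvGoA]
      by_cases hcyc : n = start ∧ ml ≤ (path.length : Int)
      · rw [if_pos hcyc, if_pos hcyc]
      · rw [if_neg hcyc, if_neg hcyc]
        have hguardA : ¬ (n ∉ pset ∧ (path.length : Int) < ml * 2) := by
          rintro ⟨-, hlt⟩; omega
        have hguardB : ¬ (n ∉ pset ∧ 0 < b) := by
          rintro ⟨-, hlt⟩; omega
        rw [if_neg hguardA, dif_neg hguardB]
        exact ih st
  | succ f ihf =>
    intro ns node b path pset stk st hb hf
    induction ns generalizing st with
    | nil => rw [pvRunB, pvGoA]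
    | cons n ns ih =>
      rw [pvRunB, pvGoA]
      by_cases hcyc : n = start ∧ ml ≤ (path.length : Int)
      · rw [if_pos hcyc, if_pos hcyc]
      · rw [if_neg hcyc, if_neg hcyc]
        by_cases hguardA : n ∉ pset ∧ (path.length : Int) < ml * 2
        · have hguardB : n ∉ pset ∧ 0 < b := ⟨hguardA.1, by omega⟩
          rw [if_pos hguardA, dif_pos hguardB]
          rw [ihf (adj.getD n []) n (b - 1) (path ++ [n]) (PySem.Set.add pset n)
                ((node, ns, b) :: stk) st (by simp; omega) (by simp; omega)]
          rw [List.dropLast_concat, pv_discard_add hguardA.1]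
          exact ih _
        · have hguardB : ¬ (n ∉ pset ∧ 0 < b) := by
            rintro ⟨hm, hlt⟩; exact hguardA ⟨hm, by omega⟩
          rw [if_neg hguardA, dif_neg hguardB]
          exact ih st

-- per-start-vertex agreement
theorem pv_start_eq (directed_edges : List (Int × Int)) (min_length v : Int)
    (st : PySem.Set Int × PySem.Set (Int × Int)) :
    pvRunB (pvAdj directed_edges) (directed_edges.length + 3) (pvAdj_getD_len directed_edges)
        min_length v [(v, (pvAdj directed_edges).getD v [], 2 * min_length - 1)] [v]
        (PySem.Set.ofList [v]) st
      = pvGoA (pvAdj directed_edges) min_length v ((min_length * 2).toNat + 1) [v]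
          (PySem.Set.ofList [v]) ((pvAdj directed_edges).getD v []) st := by
  rw [pvRunB_eq_pvGoA (pvAdj directed_edges) (directed_edges.length + 3)
        (pvAdj_getD_len directed_edges) min_length v ((min_length * 2).toNat + 1)
        ((pvAdj directed_edges).getD v []) v (2 * min_length - 1) [v] (PySem.Set.ofList [v]) []
        st (by simp; omega) (by simp; omega)]
  rw [pvRunB]

-- ===== VERDICT (by name: the statement is the Claim_ definition above) =====
theorem find_long_cycles_spec : Claim_equal_find_long_cycles := by
  intro directed_edges vertices min_length _
  unfold Spec_find_long_cycles find_long_cycles find_long_cycles_alt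
  refine congrFun (congrFun (congrArg List.foldl ?_) _) _ |>.symm
  funext st v
  exact pv_start_eq directed_edges min_length v st
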